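-- pv_equiv track=rewrite | github.com/Clark1216/CE2M_Journey-TheWorldAvatar | MARIE_AND_BERT/Evaluation/Evaluator.py | hit_k_rate
-- ===== SOURCE A (Python) =====
-- def hit_k_rate(true_answer, pred_answers):
--     scores = []
--     k_list = [1, 5, 10]
--     for k in k_list:
--         top_k_answers = pred_answers[0: min(k, len(pred_answers))]
--         if true_answer in top_k_answers:
--             scores.append(1)
--         else:
--             scores.append(0)
--     return scores
-- ===== SOURCE B (Python) =====
-- def hit_k_rate(true_answer, pred_answers):
--     pos = None
--     for i, a in enumerate(pred_answers):
--         if a == true_answer: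
--             pos = i
--             break
--     return [1 if pos is not None and pos < k else 0 for k in (1, 5, 10)]
-- ===== Notes on version B (the rewrite author's own statement) =====
-- stated objective: simpler
-- what changed: B computes the rank of true_answer once (first index, defaulting to len) and derives each hit@k by a constant comparison pos < k, instead of A's per-k slice-and-membership scans.
import Mathlib
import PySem

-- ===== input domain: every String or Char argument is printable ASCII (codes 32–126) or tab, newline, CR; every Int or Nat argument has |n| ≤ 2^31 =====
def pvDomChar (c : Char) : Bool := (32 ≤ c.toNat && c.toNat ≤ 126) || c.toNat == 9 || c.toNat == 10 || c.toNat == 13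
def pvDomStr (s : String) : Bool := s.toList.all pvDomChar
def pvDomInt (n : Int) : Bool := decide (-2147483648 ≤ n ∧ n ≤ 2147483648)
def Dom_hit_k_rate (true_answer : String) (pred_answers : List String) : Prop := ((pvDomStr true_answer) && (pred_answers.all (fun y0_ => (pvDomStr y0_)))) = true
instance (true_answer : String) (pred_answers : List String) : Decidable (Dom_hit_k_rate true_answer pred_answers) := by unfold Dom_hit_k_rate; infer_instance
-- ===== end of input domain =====

-- B computes the first index of true_answer once and compares it to each k, instead of A's per-k slice-and-membership scans; return-value equivalence, no mutation.

-- ===== PORT A =====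
def hit_k_rate (true_answer : String) (pred_answers : List String) : List Int :=
  ([1, 5, 10] : List Int).foldl
    (fun scores k =>
      let top_k_answers := PySem.List.slice pred_answers (some 0) (some (min k (pred_answers.length : Int)))
      if true_answer ∈ top_k_answers then scores ++ [1] else scores ++ [0])
    []

-- ===== PORT B =====
def hit_k_rate_alt (true_answer : String) (pred_answers : List String) : List Int :=
  let pos := PySem.List.index? pred_answers true_answer
  ([1, 5, 10] : List Int).map (fun k =>
    match pos with
    | some p => if (p : Int) < k then 1 else 0
    | none => 0)

-- ===== PRECONDITION & SPEC =====
def Spec_hit_k_rate (true_answer : String) (pred_answers : List String) (out : List Int) : Prop := out = hit_k_rate_alt true_answer pred_answers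
instance (true_answer : String) (pred_answers : List String) (out : List Int) : Decidable (Spec_hit_k_rate true_answer pred_answers out) := by unfold Spec_hit_k_rate; infer_instance

-- ===== CLAIM (what is proved, stated in full; the proofs are below) =====
def Claim_equal_hit_k_rate : Prop := ∀ (true_answer : String) (pred_answers : List String), Dom_hit_k_rate true_answer pred_answers → Spec_hit_k_rate true_answer pred_answers (hit_k_rate true_answer pred_answers)

-- ===== LEMMAS AND PROOFS =====

theorem take_min_length {α : Type} (xs : List α) (k : Nat) :
    xs.take (min k xs.length) = xs.take k := by
  by_cases h : k ≤ xs.length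
  · rw [min_eq_left h]
  · rw [min_eq_right (by omega), List.take_length, List.take_of_length_le (by omega)]

-- membership in the first-k prefix is exactly 'first index < k'
theorem mem_take_iff_index_lt (xs : List String) (v : String) (k : Nat) :
    v ∈ xs.take k ↔ ∃ p, PySem.List.index? xs v = some p ∧ p < k := by
  induction xs generalizing k with
  | nil => simp [PySem.List.index?_eq_idxOf?]
  | cons x xs ih =>
    cases k with
    | zero => simp
    | succ k =>
      by_cases hx : x = v
      · subst hx
        rw [PySem.List.index?_cons_self]
        constructor
        · intro _; exact ⟨0, rfl, by omega⟩
        · intro _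
          rw [List.take_succ_cons]
          exact List.mem_cons_self
      · rw [PySem.List.index?_cons_of_ne xs hx]
        simp only [List.take_succ_cons, List.mem_cons, ih]
        constructor
        · rintro (h | ⟨p, hp, hlt⟩)
          · exact absurd h.symm hx
          · exact ⟨p + 1, by rw [hp]; rfl, by omega⟩
        · rintro ⟨q, hq, hlt⟩
          cases hidx : PySem.List.index? xs v with
          | none =>
            rw [hidx] at hq
            exact absurd hq (by simp only [Option.map_none, reduceCtorEq, not_false_eq_true])
          | some p =>
            rw [hidx] at hq
            simp only [Option.map_some, Option.some.injEq] at hq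
            exact .inr ⟨p, rfl, by omega⟩

theorem one_step (true_answer : String) (pred_answers : List String) (k : Nat) :
    (if true_answer ∈ PySem.List.slice pred_answers (some 0) (some (min ((k : Nat) : Int) (pred_answers.length : Int))) then (1 : Int) else 0)
      = (match PySem.List.index? pred_answers true_answer with
         | some p => if (p : Int) < ((k : Nat) : Int) then (1 : Int) else 0
         | none => 0) := by
  have hmin : min ((k : Nat) : Int) (pred_answers.length : Int) = ((min k pred_answers.length : Nat) : Int) := by
    push_cast; rfl
  rw [hmin, PySem.List.slice_zero_start, PySem.List.slice_to_natCast, take_min_length]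
  cases hidx : PySem.List.index? pred_answers true_answer with
  | none =>
    have : true_answer ∉ pred_answers.take k := by
      intro h
      obtain ⟨p, hp, _⟩ := (mem_take_iff_index_lt _ _ _).mp h
      rw [hidx] at hp
      cases hp
    simp [this]
  | some p =>
    by_cases hlt : p < k
    · have hm : true_answer ∈ pred_answers.take k :=
        (mem_take_iff_index_lt _ _ _).mpr ⟨p, hidx, hlt⟩
      simp only [hm, if_true]
      rw [if_pos (by exact_mod_cast hlt)]
    · have hm : true_answer ∉ pred_answers.take k := by
        intro h
        obtain ⟨q, hq, hqlt⟩ := (mem_take_iff_index_lt _ _ _).mp h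
        rw [hidx] at hq; injection hq with h2; omega
      simp only [hm, if_false]
      rw [if_neg (by exact_mod_cast hlt)]

theorem append_if_single (c : Prop) [Decidable c] (s : List Int) :
    (if c then s ++ [(1:Int)] else s ++ [0]) = s ++ [if c then 1 else 0] := by
  split <;> rfl

-- ===== VERDICT (by name: the statement is the Claim_ definition above) =====
theorem hit_k_rate_spec : Claim_equal_hit_k_rate := by
  intro t xs _
  unfold Spec_hit_k_rate hit_k_rate hit_k_rate_alt
  simp only [List.foldl, List.map]
  rw [append_if_single, append_if_single, append_if_single]
  simp only [List.nil_append, List.singleton_append]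
  have h1 := one_step t xs 1
  have h5 := one_step t xs 5
  have h10 := one_step t xs 10
  simp only [Nat.cast_one, Nat.cast_ofNat] at h1 h5 h10
  rw [h1, h5, h10]
  cases PySem.List.index? xs t <;> rfl
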